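-- pv_equiv track=rewrite | github.com/Alteztyn/TBA---Assignment | tbas_.py | isPredikat
-- ===== SOURCE A (Python) =====
-- def isPredikat(word: str) -> bool:
--     # Predikat = {'makan', 'minum', 'baca', 'bermain', 'memakai'}
--     current_State_Q = 0
--     for letter in word:
--         match current_State_Q:
--             case -1: break
--             case 0:
--                 if letter == 'm': current_State_Q = 1
--                 elif letter == 'b': current_State_Q = 16
--                 else: current_State_Q = -1
--             case 1:
--                 if letter == 'a': current_State_Q = 6
--                 elif letter == 'i': current_State_Q = 2
--                 elif letter == 'e': current_State_Q = 10
--                 else: current_State_Q = -1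
--             case 16:
--                 if letter == 'a': current_State_Q = 17
--                 elif letter == 'e': current_State_Q = 20
--                 else: current_State_Q = -1
--             case 2: current_State_Q = 3 if letter == 'n' else -1
--             case 3: current_State_Q = 4 if letter == 'u' else -1
--             case 4: current_State_Q = 5 if letter == 'm' else -1
--             case 5: current_State_Q = 5 if letter == ' ' else -1#final minum
--
--             case 6: current_State_Q = 7 if letter == 'k' else -1
--             case 7: current_State_Q = 8 if letter == 'a' else -1
--             case 8: current_State_Q = 9 if letter == 'n' else -1
--             case 9: current_State_Q = 9 if letter == ' ' else -1 #final makan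
--
--             case 10: current_State_Q = 11 if letter == 'm' else -1
--             case 11: current_State_Q = 12 if letter == 'a' else -1
--             case 12: current_State_Q = 13 if letter == 'k' else -1
--             case 13: current_State_Q = 14 if letter == 'a' else -1
--             case 14: current_State_Q = 15 if letter == 'i' else -1
--             case 15: current_State_Q = 15 if letter == ' ' else -1#final memakai
--
--             case 16: current_State_Q = 17 if letter == 'a' else -1
--             case 17: current_State_Q = 18 if letter == 'c' else -1
--             case 18: current_State_Q = 19 if letter == 'a' else -1
--             case 19: current_State_Q = 19  if letter == ' ' else -1#final baca
--
--             case 20: current_State_Q = 21 if letter == 'r' else -1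
--             case 21: current_State_Q = 22 if letter == 'm' else -1
--             case 22: current_State_Q = 23 if letter == 'a' else -1
--             case 23: current_State_Q = 24 if letter == 'i' else -1
--             case 24: current_State_Q = 9 if letter == 'n' else -1
--
--     return current_State_Q == 5 or current_State_Q == 9 or current_State_Q == 15 or current_State_Q == 19
-- ===== SOURCE B (Python) =====
-- def isPredikat(word: str) -> bool:
--     # Predikat = {'makan', 'minum', 'baca', 'bermain', 'memakai'}
--     return word.rstrip(' ') in {'makan', 'minum', 'baca', 'bermain', 'memakai'}
-- ===== Notes on version B (the rewrite author's own statement) =====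
-- stated objective: simpler
-- what changed: Replaces the hand-rolled 26-state character-by-character DFA scan with a one-line normalization (dropping only trailing space characters via str.rstrip with a space argument, so tabs/newlines stay rejected) plus membership in the literal 5-word set.
import Mathlib
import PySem

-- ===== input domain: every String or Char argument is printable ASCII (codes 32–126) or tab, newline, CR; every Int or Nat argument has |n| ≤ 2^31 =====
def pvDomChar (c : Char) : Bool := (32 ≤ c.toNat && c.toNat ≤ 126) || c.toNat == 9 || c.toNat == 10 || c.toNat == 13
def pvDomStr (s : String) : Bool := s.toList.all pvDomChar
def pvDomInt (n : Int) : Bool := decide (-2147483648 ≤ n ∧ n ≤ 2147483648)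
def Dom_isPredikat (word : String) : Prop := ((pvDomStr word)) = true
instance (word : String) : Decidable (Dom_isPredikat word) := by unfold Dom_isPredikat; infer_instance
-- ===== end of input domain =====

-- B replaces A's 26-state character-by-character DFA scan with one strip-trailing-spaces-then-set-membership test (objective: simpler).


-- ===== PORT A =====
-- one DFA transition (Python's match statement; the duplicate 'case 16' arm is dead code, first arm wins)
def stepA (s : Int) (c : Char) : Int :=
  match s with
  | 0 => if c = 'm' then 1 else if c = 'b' then 16 else -1
  | 1 => if c = 'a' then 6 else if c = 'i' then 2 else if c = 'e' then 10 else -1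
  | 16 => if c = 'a' then 17 else if c = 'e' then 20 else -1
  | 2 => if c = 'n' then 3 else -1
  | 3 => if c = 'u' then 4 else -1
  | 4 => if c = 'm' then 5 else -1
  | 5 => if c = ' ' then 5 else -1
  | 6 => if c = 'k' then 7 else -1
  | 7 => if c = 'a' then 8 else -1
  | 8 => if c = 'n' then 9 else -1
  | 9 => if c = ' ' then 9 else -1
  | 10 => if c = 'm' then 11 else -1
  | 11 => if c = 'a' then 12 else -1
  | 12 => if c = 'k' then 13 else -1
  | 13 => if c = 'a' then 14 else -1
  | 14 => if c = 'i' then 15 else -1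
  | 15 => if c = ' ' then 15 else -1
  | 17 => if c = 'c' then 18 else -1
  | 18 => if c = 'a' then 19 else -1
  | 19 => if c = ' ' then 19 else -1
  | 20 => if c = 'r' then 21 else -1
  | 21 => if c = 'm' then 22 else -1
  | 22 => if c = 'a' then 23 else -1
  | 23 => if c = 'i' then 24 else -1
  | 24 => if c = 'n' then 9 else -1
  | s => s

-- the for-loop with its 'case -1: break'
def runA (s : Int) : List Char → Int
  | [] => s
  | c :: rest => if s = -1 then s else runA (stepA s c) rest

def isPredikat (word : String) : Bool :=
  let f := runA 0 word.toList
  f == 5 || f == 9 || f == 15 || f == 19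

-- ===== PORT B =====
-- hand port of Python's str.rstrip with a single-space chars argument: drops trailing space characters only (exact; PySem has no rstrip-with-chars primitive)
def rstripSp : List Char → List Char
  | [] => []
  | c :: t =>
    match rstripSp t with
    | [] => if c = ' ' then [] else [c]
    | w => c :: w

def isPredikat_alt (word : String) : Bool :=
  decide (rstripSp word.toList ∈
    (["makan".toList, "minum".toList, "baca".toList, "bermain".toList, "memakai".toList] : List (List Char)))

-- ===== PRECONDITION & SPEC =====
def Spec_isPredikat (word : String) (out : Bool) : Prop := out = isPredikat_alt word
instance (word : String) (out : Bool) : Decidable (Spec_isPredikat word out) := by unfold Spec_isPredikat; infer_instance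

-- ===== CLAIM (what is proved, stated in full; the proofs are below) =====
def Claim_equal_isPredikat : Prop := ∀ (word : String), Dom_isPredikat word → Spec_isPredikat word (isPredikat word)

-- ===== LEMMAS AND PROOFS =====

-- the DFA's live states
def pvStates : List Int := [-1,0,1,2,3,4,5,6,7,8,9,10,11,12,13,14,15,16,17,18,19,20,21,22,23,24]

-- residual language of each state: the words w (no trailing-space part) accepted from s
def R : Int → List (List Char)
  | 0 => ["makan".toList, "minum".toList, "baca".toList, "bermain".toList, "memakai".toList]
  | 1 => ["akan".toList, "inum".toList, "emakai".toList]
  | 2 => ["num".toList]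
  | 3 => ["um".toList]
  | 4 => ["m".toList]
  | 5 => [[]]
  | 6 => ["kan".toList]
  | 7 => ["an".toList]
  | 8 => ["n".toList]
  | 9 => [[]]
  | 10 => ["makai".toList]
  | 11 => ["akai".toList]
  | 12 => ["kai".toList]
  | 13 => ["ai".toList]
  | 14 => ["i".toList]
  | 15 => [[]]
  | 16 => ["aca".toList, "ermain".toList]
  | 17 => ["ca".toList]
  | 18 => ["a".toList]
  | 19 => [[]]
  | 20 => ["rmain".toList]
  | 21 => ["main".toList]
  | 22 => ["ain".toList]
  | 23 => ["in".toList]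
  | 24 => ["n".toList]
  | _ => []

set_option maxHeartbeats 1600000 in
lemma stepA_mem (s : Int) (hs : s ∈ pvStates) (c : Char) : stepA s c ∈ pvStates := by
  fin_cases hs <;> simp only [stepA] <;> (try split_ifs) <;> decide

lemma rstripSp_cons (c : Char) (t : List Char) :
    rstripSp (c :: t) = if c = ' ' ∧ rstripSp t = [] then [] else c :: rstripSp t := by
  simp only [rstripSp]
  rcases hw : rstripSp t with _ | ⟨d, u⟩ <;> split_ifs <;> simp_all

set_option maxHeartbeats 3200000 in
lemma transfer (s : Int) (hs : s ∈ pvStates) (c : Char) (w : List Char) :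
    ((if c = ' ' ∧ w = [] then ([] : List Char) else c :: w) ∈ R s) ↔ w ∈ R (stepA s c) := by
  fin_cases hs <;>
    · simp only [stepA, R]
      split_ifs <;> simp_all

lemma runA_main (l : List Char) : ∀ s ∈ pvStates,
    ((runA s l == 5 || runA s l == 9 || runA s l == 15 || runA s l == 19) = true ↔ rstripSp l ∈ R s) := by
  induction l with
  | nil => intro s hs; fin_cases hs <;> decide
  | cons c t ih =>
    intro s hs
    by_cases hneg : s = -1
    · subst hneg
      simp [runA, rstripSp_cons, R]
    · rw [show runA s (c :: t) = runA (stepA s c) t from by simp [runA, hneg]]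
      rw [ih (stepA s c) (stepA_mem s hs c), rstripSp_cons]
      exact (transfer s hs c (rstripSp t)).symm

-- ===== VERDICT (by name: the statement is the Claim_ definition above) =====
theorem isPredikat_spec : Claim_equal_isPredikat := by
  intro word _
  unfold Spec_isPredikat isPredikat isPredikat_alt
  rw [Bool.eq_iff_iff]
  rw [decide_eq_true_iff]
  exact runA_main word.toList 0 (by decide)
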